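-- pv_equiv track=rewrite | github.com/matibat/Torres-de-Han-i-en-Python-4k---HD---NO-FAKE---100-REAL- | aros.py | generarDibujo
-- ===== SOURCE A (Python) =====
-- import copy
--
-- aro = "0"
--
-- palo = "|"
--
-- base = "="
--
-- vacio = " "
--
-- numAros = 5
--
-- numPalos = 3
--
-- def generarDibujo(palos, distancia, altura):
--     salida = []
--     ancho = 3 + (numAros*2)
--
--     montones = copy.deepcopy(palos)
--     for i in range(0, len(palos)):
--         ceros = []
--         for x in range(0, altura-len(montones[i])):
--             ceros.append(0)
--         montones[i] = ceros + montones[i]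
--     linea = "{0}{1}{2}".format(
--         vacio*distancia + vacio*int(ancho/2),
--         palo,
--         vacio*int(ancho/2),
--     )
--     salida.append(linea*numPalos)
--     for posicion in range(0, numAros):
--         linea = vacio*distancia
--         for monton in montones:
--             if monton[posicion] == 0:
--                 dibujoAro = palo
--             else:
--                 dibujoAro = aro*(1 + 2*monton[posicion])
--             espacioLateral = vacio*(numAros - monton[posicion] + 1)
--             linea += espacioLateral + dibujoAro + espacioLateral + vacio*distancia
--         salida.append(linea)
--     linea = vacio*distancia + base*(ancho)
--     salida.append(linea*numPalos)
--     return salida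
-- ===== SOURCE B (Python) =====
-- def generarDibujo(palos, distancia, altura):
--     sep = " " * distancia
--
--     def celda(v):
--         lado = " " * (6 - v)
--         return lado + ("|" if v == 0 else "0" * (1 + 2 * v)) + lado + sep
--
--     def columna(peg):
--         vals = ([0] * max(0, altura - len(peg)) + peg)[:5]
--         return [celda(v) for v in vals]
--
--     filas = [sep] * 5
--     for col in map(columna, palos):
--         filas = [f + c for f, c in zip(filas, col)]
--
--     cabecera = (sep + " " * 6 + "|" + " " * 6) * 3
--     pie = (sep + "=" * 13) * 3
--     return [cabecera] + filas + [pie]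
-- ===== Notes on version B (the rewrite author's own statement) =====
-- stated objective: alternative
-- what changed: B generates the drawing column-major: for each peg it builds a vertical strip of the 5 visible cell values, renders each strip into ready-made cell strings, and merges the strips into rows by element-wise zip-concatenation; A instead pads a deep-copied grid of disk numbers with zeros and scans it row-major with positional indexing, accumulating each row string across pegs.
import Mathlib
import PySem

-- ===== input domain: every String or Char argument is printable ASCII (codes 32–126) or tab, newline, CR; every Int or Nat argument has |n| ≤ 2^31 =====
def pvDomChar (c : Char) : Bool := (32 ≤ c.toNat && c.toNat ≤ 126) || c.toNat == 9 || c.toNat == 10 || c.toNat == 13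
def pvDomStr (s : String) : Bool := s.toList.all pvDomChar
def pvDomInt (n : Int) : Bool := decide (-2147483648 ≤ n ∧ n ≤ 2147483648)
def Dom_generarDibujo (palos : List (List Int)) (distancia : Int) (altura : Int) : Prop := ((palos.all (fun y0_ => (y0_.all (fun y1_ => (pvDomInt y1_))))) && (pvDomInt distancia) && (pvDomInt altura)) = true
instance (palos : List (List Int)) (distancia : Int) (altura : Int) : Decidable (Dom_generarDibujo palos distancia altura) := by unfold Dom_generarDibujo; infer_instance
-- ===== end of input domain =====

-- B builds the drawing column-major (one rendered 5-cell strip per peg, strips merged into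
-- rows by element-wise zip-concatenation) instead of A's row-major scan of a zero-padded
-- deep-copied grid. Objective: alternative; equivalence is about the return value only.

-- ===== PORT A =====
-- module constants of Source A (strings as List Char; every line is materialised as a String at the end)
def pvAro : List Char := ['0']
def pvPalo : List Char := ['|']
def pvBase : List Char := ['=']
def pvVacio : List Char := [' ']
def pvNumAros : Int := 5
def pvNumPalos : Int := 3

def generarDibujo (palos : List (List Int)) (distancia : Int) (altura : Int) : List String :=
  let ancho : Int := 3 + pvNumAros * 2
  -- montones[i] = ceros + palos[i], ceros built by the appending loop over range(0, altura-len)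
  let montones := palos.map (fun m =>
    let ceros := (PySem.List.pyRange 0 (altura - (m.length : Int)) 1).foldl
      (fun acc _ => acc ++ [(0 : Int)]) []
    ceros ++ m)
  let linea0 := PySem.List.pyRepeat pvVacio distancia ++ PySem.List.pyRepeat pvVacio (PySem.Int.floordiv ancho 2)
      ++ pvPalo ++ PySem.List.pyRepeat pvVacio (PySem.Int.floordiv ancho 2)
  let salida : List String := [String.ofList (PySem.List.pyRepeat linea0 pvNumPalos)]
  let salida := (PySem.List.pyRange 0 pvNumAros 1).foldl (fun salida posicion =>
    let linea := montones.foldl (fun linea monton =>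
      -- monton[posicion]; none = IndexError, excluded by Pre_generarDibujo
      let v := (PySem.List.pyGet? monton posicion).getD 0
      let dibujoAro := if v == 0 then pvPalo else PySem.List.pyRepeat pvAro (1 + 2 * v)
      let espacioLateral := PySem.List.pyRepeat pvVacio (pvNumAros - v + 1)
      linea ++ espacioLateral ++ dibujoAro ++ espacioLateral ++ PySem.List.pyRepeat pvVacio distancia)
      (PySem.List.pyRepeat pvVacio distancia)
    salida ++ [String.ofList linea]) salida
  let lineaN := PySem.List.pyRepeat pvVacio distancia ++ PySem.List.pyRepeat pvBase ancho
  salida ++ [String.ofList (PySem.List.pyRepeat lineaN pvNumPalos)]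

-- ===== PORT B =====
-- Source B's celda(v): one fully rendered cell string
def pvCelda (distancia : Int) (v : Int) : List Char :=
  let lado := PySem.List.pyRepeat [' '] (6 - v)
  lado ++ (if v == 0 then ['|'] else PySem.List.pyRepeat ['0'] (1 + 2 * v)) ++ lado
    ++ PySem.List.pyRepeat [' '] distancia

-- Source B's columna(peg): render ([0] * max(0, altura - len(peg)) + peg)[:5]
def pvColumna (distancia : Int) (altura : Int) (peg : List Int) : List (List Char) :=
  (PySem.List.slice
    (PySem.List.pyRepeat [(0 : Int)] (max 0 (altura - (peg.length : Int))) ++ peg)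
    none (some 5)).map (pvCelda distancia)

def generarDibujo_alt (palos : List (List Int)) (distancia : Int) (altura : Int) : List String :=
  let sep := PySem.List.pyRepeat [' '] distancia
  let filas := (palos.map (pvColumna distancia altura)).foldl
    (fun filas col => (filas.zip col).map (fun fc => fc.1 ++ fc.2))
    (PySem.List.pyRepeat [sep] (5 : Int))
  let cabecera := PySem.List.pyRepeat
    (sep ++ PySem.List.pyRepeat [' '] (6 : Int) ++ ['|'] ++ PySem.List.pyRepeat [' '] (6 : Int)) (3 : Int)
  let pie := PySem.List.pyRepeat (sep ++ PySem.List.pyRepeat ['='] (13 : Int)) (3 : Int)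
  [String.ofList cabecera] ++ filas.map String.ofList ++ [String.ofList pie]

-- ===== PRECONDITION & SPEC =====
-- Pre_ excludes exactly the inputs where A raises IndexError: some peg whose padded height
-- max(altura, len(peg)) is below numAros = 5, so monton[posicion] goes out of range.
def Pre_generarDibujo (palos : List (List Int)) (distancia : Int) (altura : Int) : Prop :=
  ∀ p ∈ palos, 5 ≤ max altura (p.length : Int)
instance (palos : List (List Int)) (distancia : Int) (altura : Int) : Decidable (Pre_generarDibujo palos distancia altura) := by unfold Pre_generarDibujo; infer_instance

def pvWitness_generarDibujo : List (List Int) × Int × Int := ([[2, 1], [3]], 1, 5)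

def Spec_generarDibujo (palos : List (List Int)) (distancia : Int) (altura : Int) (out : List String) : Prop := out = generarDibujo_alt palos distancia altura
instance (palos : List (List Int)) (distancia : Int) (altura : Int) (out : List String) : Decidable (Spec_generarDibujo palos distancia altura out) := by unfold Spec_generarDibujo; infer_instance

-- ===== CLAIM (what is proved, stated in full; the proofs are below) =====
def Claim_equal_generarDibujo : Prop := ∀ (palos : List (List Int)) (distancia : Int) (altura : Int), Dom_generarDibujo palos distancia altura → Pre_generarDibujo palos distancia altura → Spec_generarDibujo palos distancia altura (generarDibujo palos distancia altura)

-- ===== LEMMAS AND PROOFS =====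

-- A's padded pile: the zero-building loop is replicate of the range length
theorem pvPad_eq (altura : Int) (m : List Int) :
    (PySem.List.pyRange 0 (altura - (m.length : Int)) 1).foldl
      (fun acc _ => acc ++ [(0 : Int)]) [] ++ m
    = List.replicate (altura - (m.length : Int)).toNat 0 ++ m := by
  rw [PySem.List.foldl_append_singleton_eq_map]
  simp [List.map_const', PySem.List.length_pyRange_one]

-- B's strip is the cell renderer mapped over A's padded pile, truncated to 5 rows
theorem pvColumna_eq_map (distancia altura : Int) (m : List Int) :
    pvColumna distancia altura m
    = ((List.replicate (altura - (m.length : Int)).toNat 0 ++ m).map (pvCelda distancia)).take 5 := by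
  unfold pvColumna
  have h : (max 0 (altura - (m.length : Int))).toNat = (altura - (m.length : Int)).toNat := by omega
  have hs : PySem.List.slice
      (PySem.List.pyRepeat [(0 : Int)] (max 0 (altura - (m.length : Int))) ++ m) none (some 5)
      = (PySem.List.pyRepeat [(0 : Int)] (max 0 (altura - (m.length : Int))) ++ m).take 5 := by
    simp [pysem]
  rw [hs, PySem.List.pyRepeat_singleton, h, List.map_take]

theorem pvColumna_length (distancia altura : Int) (m : List Int)
    (hm : 5 ≤ max altura (m.length : Int)) :
    (pvColumna distancia altura m).length = 5 := by
  rw [pvColumna_eq_map]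
  simp only [List.length_take, List.length_map, List.length_append, List.length_replicate]
  omega

-- A's per-peg chunk at row pos equals row pos of B's strip for that peg
theorem pvChunk_eq (distancia altura : Int) (m : List Int)
    (hm : 5 ≤ max altura (m.length : Int)) (pos : Nat) (hpos : pos < 5) :
    (let v := (PySem.List.pyGet? (List.replicate (altura - (m.length : Int)).toNat 0 ++ m) (pos : Int)).getD 0
     PySem.List.pyRepeat pvVacio (pvNumAros - v + 1)
       ++ (if v == 0 then pvPalo else PySem.List.pyRepeat pvAro (1 + 2 * v))
       ++ PySem.List.pyRepeat pvVacio (pvNumAros - v + 1)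
       ++ PySem.List.pyRepeat pvVacio distancia)
    = (pvColumna distancia altura m).getD pos [] := by
  set padded := List.replicate (altura - (m.length : Int)).toNat 0 ++ m with hpadded
  have hlen : pos < padded.length := by
    simp only [hpadded, List.length_append, List.length_replicate]; omega
  rw [pvColumna_eq_map, ← hpadded]
  have hget : ((padded.map (pvCelda distancia)).take 5).getD pos []
      = pvCelda distancia padded[pos] := by
    rw [List.getD, List.getElem?_take_of_lt hpos]
    simp [List.getElem?_map, List.getElem?_eq_getElem hlen]
  rw [hget]
  have hv : (PySem.List.pyGet? padded (pos : Int)).getD 0 = padded[pos] := by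
    rw [PySem.List.pyGet?_natCast, List.getElem?_eq_getElem hlen]; rfl
  have harith : (5 : Int) - padded[pos] + 1 = 6 - padded[pos] := by ring
  simp only [hv, pvCelda, pvVacio, pvPalo, pvAro, pvNumAros, harith]

-- one row of A equals sep ++ concatenation of row pos of every strip
theorem pvRow_eq (palos : List (List Int)) (distancia altura : Int)
    (hpre : ∀ p ∈ palos, 5 ≤ max altura (p.length : Int)) (pos : Nat) (hpos : pos < 5) :
    (palos.map (fun m =>
        (PySem.List.pyRange 0 (altura - (m.length : Int)) 1).foldl
          (fun acc _ => acc ++ [(0 : Int)]) [] ++ m)).foldl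
      (fun linea monton =>
        let v := (PySem.List.pyGet? monton (pos : Int)).getD 0
        let dibujoAro := if v == 0 then pvPalo else PySem.List.pyRepeat pvAro (1 + 2 * v)
        let espacioLateral := PySem.List.pyRepeat pvVacio (pvNumAros - v + 1)
        linea ++ espacioLateral ++ dibujoAro ++ espacioLateral ++ PySem.List.pyRepeat pvVacio distancia)
      (PySem.List.pyRepeat pvVacio distancia)
    = PySem.List.pyRepeat [' '] distancia
      ++ ((palos.map (pvColumna distancia altura)).map (fun c => c.getD pos [])).flatten := by
  rw [List.foldl_map, List.map_map, Function.comp_def]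
  have := PySem.List.foldl_append_eq_flatMap
    (g := fun m => (pvColumna distancia altura m).getD pos [])
    (l := palos) (acc := PySem.List.pyRepeat [' '] distancia)
  rw [List.flatMap] at this
  rw [← this]
  apply PySem.List.foldl_congr_mem
  intro acc m hmem
  show acc ++ _ ++ _ ++ _ ++ _ = acc ++ (pvColumna distancia altura m).getD pos []
  rw [pvPad_eq]
  rw [← pvChunk_eq distancia altura m (hpre m hmem) pos hpos]
  simp [List.append_assoc]

-- merging the strips by zip-concatenation, row by row
theorem pvFold5 (cols : List (List (List Char))) (h : ∀ c ∈ cols, c.length = 5) :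
    ∀ f0 f1 f2 f3 f4 : List Char,
    cols.foldl (fun filas col => (filas.zip col).map (fun fc => fc.1 ++ fc.2)) [f0, f1, f2, f3, f4]
    = [f0 ++ (cols.map (fun c => c.getD 0 [])).flatten,
       f1 ++ (cols.map (fun c => c.getD 1 [])).flatten,
       f2 ++ (cols.map (fun c => c.getD 2 [])).flatten,
       f3 ++ (cols.map (fun c => c.getD 3 [])).flatten,
       f4 ++ (cols.map (fun c => c.getD 4 [])).flatten] := by
  induction cols with
  | nil => intro f0 f1 f2 f3 f4; simp
  | cons c cs ih =>
    intro f0 f1 f2 f3 f4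
    obtain ⟨a0, a1, a2, a3, a4, rfl⟩ : ∃ a0 a1 a2 a3 a4, c = [a0, a1, a2, a3, a4] := by
      have hc := h c (by simp)
      match c, hc with
      | [a0, a1, a2, a3, a4], _ => exact ⟨_, _, _, _, _, rfl⟩
    simp only [List.foldl_cons]
    rw [show ([f0, f1, f2, f3, f4].zip [a0, a1, a2, a3, a4]).map (fun fc => fc.1 ++ fc.2)
        = [f0 ++ a0, f1 ++ a1, f2 ++ a2, f3 ++ a3, f4 ++ a4] from rfl]
    rw [ih (fun c hc => h c (by simp [hc])) (f0 ++ a0) (f1 ++ a1) (f2 ++ a2) (f3 ++ a3) (f4 ++ a4)]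
    simp [List.getD, List.append_assoc]

theorem generarDibujo_eq_alt (palos : List (List Int)) (distancia altura : Int)
    (hpre : ∀ p ∈ palos, 5 ≤ max altura (p.length : Int)) :
    generarDibujo palos distancia altura = generarDibujo_alt palos distancia altura := by
  unfold generarDibujo generarDibujo_alt
  have hrange : PySem.List.pyRange 0 pvNumAros 1 = [0, 1, 2, 3, 4] := by decide
  rw [hrange]
  simp only [List.foldl_cons, List.foldl_nil]
  have hrow : ∀ (pos : Nat), pos < 5 →
      (palos.map (fun m =>
          (PySem.List.pyRange 0 (altura - (m.length : Int)) 1).foldl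
            (fun acc _ => acc ++ [(0 : Int)]) [] ++ m)).foldl
        (fun linea monton =>
          let v := (PySem.List.pyGet? monton (pos : Int)).getD 0
          let dibujoAro := if v == 0 then pvPalo else PySem.List.pyRepeat pvAro (1 + 2 * v)
          let espacioLateral := PySem.List.pyRepeat pvVacio (pvNumAros - v + 1)
          linea ++ espacioLateral ++ dibujoAro ++ espacioLateral ++ PySem.List.pyRepeat pvVacio distancia)
        (PySem.List.pyRepeat pvVacio distancia)
      = PySem.List.pyRepeat [' '] distancia
        ++ ((palos.map (pvColumna distancia altura)).map (fun c => c.getD pos [])).flatten :=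
    pvRow_eq palos distancia altura hpre
  have h0 := hrow 0 (by omega); have h1 := hrow 1 (by omega); have h2 := hrow 2 (by omega)
  have h3 := hrow 3 (by omega); have h4 := hrow 4 (by omega)
  push_cast at h0 h1 h2 h3 h4
  rw [h0, h1, h2, h3, h4]
  have hinit : PySem.List.pyRepeat [PySem.List.pyRepeat [' '] distancia] (5 : Int)
      = [PySem.List.pyRepeat [' '] distancia, PySem.List.pyRepeat [' '] distancia,
         PySem.List.pyRepeat [' '] distancia, PySem.List.pyRepeat [' '] distancia,
         PySem.List.pyRepeat [' '] distancia] := by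
    rw [PySem.List.pyRepeat_singleton]; rfl
  rw [hinit, pvFold5 (palos.map (pvColumna distancia altura))
      (by intro c hc
          obtain ⟨m, hm, rfl⟩ := List.mem_map.mp hc
          exact pvColumna_length distancia altura m (hpre m hm))]
  have hhead : PySem.List.pyRepeat pvVacio distancia
      ++ PySem.List.pyRepeat pvVacio (PySem.Int.floordiv (3 + pvNumAros * 2) 2)
      ++ pvPalo ++ PySem.List.pyRepeat pvVacio (PySem.Int.floordiv (3 + pvNumAros * 2) 2)
      = PySem.List.pyRepeat [' '] distancia ++ PySem.List.pyRepeat [' '] (6 : Int)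
        ++ ['|'] ++ PySem.List.pyRepeat [' '] (6 : Int) := by
    have : PySem.Int.floordiv (3 + pvNumAros * 2) 2 = 6 := by decide
    rw [this]; rfl
  have hfoot : PySem.List.pyRepeat pvVacio distancia ++ PySem.List.pyRepeat pvBase (3 + pvNumAros * 2)
      = PySem.List.pyRepeat [' '] distancia ++ PySem.List.pyRepeat ['='] (13 : Int) := by
    have : (3 + pvNumAros * 2 : Int) = 13 := by decide
    rw [this]; rfl
  rw [hhead, hfoot]
  have hnp : pvNumPalos = (3 : Int) := rfl
  rw [hnp]
  simp [List.append_assoc]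

-- ===== VERDICT (by name: the statement is the Claim_ definition above) =====
theorem generarDibujo_spec : Claim_equal_generarDibujo := by
  intro palos distancia altura _ hpre
  unfold Spec_generarDibujo
  exact generarDibujo_eq_alt palos distancia altura hpre
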